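-- pv_equiv track=rewrite | github.com/aysieelf/Alpha63 | Week_2/2_Git/tuple_myversion.py | delete_subtuple
-- ===== SOURCE A (Python) =====
-- def delete_subtuple(sub_tuple, the_tuple):
--     """
--     Returns a new tuple that is the result of a subtuple removed from a larger one.
--     Returns the larger tuple if it does not contain the smaller one.
--
--     Parameters:
--         sub_tuple (tuple) - The tuple to be removed
--         the_tuple (tuple) - The larger tuple
--
--     Returns:
--         (tuple) - The resulting tuple
--     """
--     index = -1
--     for i in range(len(the_tuple)-len(sub_tuple) + 1):
--         if sub_tuple == the_tuple[i:i+len(sub_tuple)]: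
--             index = i
--     if index == -1:
--         return the_tuple
--     new_lst = the_tuple[:index] + the_tuple[index+len(sub_tuple):]
--
--     return tuple(new_lst)
-- ===== SOURCE B (Python) =====
-- def delete_subtuple(sub_tuple, the_tuple):
--     m = len(sub_tuple)
--     if m == 0:
--         return the_tuple
--     masks = {}
--     for j, x in enumerate(sub_tuple):
--         masks[x] = masks.get(x, 0) | (1 << j)
--     accept = 1 << (m - 1)
--     state = 0
--     last = -1
--     for i, c in enumerate(the_tuple):
--         state = ((state << 1) | 1) & masks.get(c, 0)
--         if state & accept:
--             last = i - m + 1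
--     if last == -1:
--         return the_tuple
--     return the_tuple[:last] + the_tuple[last + m:]
-- ===== Notes on version B (the rewrite author's own statement) =====
-- stated objective: alternative
-- what changed: B replaces A's per-position slice comparison (compare the m-element window at every index, remembering the last match) by the Shift-And/bitap string-matching algorithm: a per-value bitmask dictionary built once over the pattern, then a single pass over the tuple updating one integer bitmask of live partial matches, splicing at the last position whose accept bit fired; bit-parallel, but it trades memory (per-value m-bit masks) for the inner comparison loop, so it is not faster in CPython for very long patterns.
import Mathlib
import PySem

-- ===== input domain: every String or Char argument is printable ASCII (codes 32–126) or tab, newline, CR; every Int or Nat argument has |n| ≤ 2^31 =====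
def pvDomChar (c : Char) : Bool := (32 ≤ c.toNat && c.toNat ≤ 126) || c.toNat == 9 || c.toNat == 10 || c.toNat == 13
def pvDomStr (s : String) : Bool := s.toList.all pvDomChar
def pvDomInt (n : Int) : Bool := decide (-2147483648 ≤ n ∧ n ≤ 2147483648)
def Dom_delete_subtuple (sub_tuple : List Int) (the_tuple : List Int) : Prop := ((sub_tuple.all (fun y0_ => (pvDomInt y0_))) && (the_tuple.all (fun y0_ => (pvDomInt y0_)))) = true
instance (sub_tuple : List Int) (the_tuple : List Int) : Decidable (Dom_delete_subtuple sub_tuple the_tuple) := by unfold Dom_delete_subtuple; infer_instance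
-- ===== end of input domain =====

-- B replaces A's per-position slice comparison by the Shift-And (bitap) string-matching
-- algorithm: a bitmask per value built once, then one pass over the tuple updating a
-- bitmask of live partial matches; same result (last occurrence spliced out).

-- ===== PORT A =====
-- literal transliteration of A: forward scan over range(len(t)-len(s)+1) keeping the last match
def delete_subtuple (sub_tuple : List Int) (the_tuple : List Int) : List Int :=
  let index : Int :=
    (PySem.List.pyRange 0 ((the_tuple.length : Int) - (sub_tuple.length : Int) + 1) 1).foldl
      (fun idx i =>
        if sub_tuple = PySem.List.slice the_tuple (some i) (some (i + (sub_tuple.length : Int)))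
        then i else idx) (-1)
  if index = -1 then the_tuple
  else PySem.List.slice the_tuple none (some index) ++
       PySem.List.slice the_tuple (some (index + (sub_tuple.length : Int))) none

-- ===== PORT B =====
-- Source B's mask-building loop 'for j, x in enumerate(sub_tuple): masks[x] |= 1 << j'
-- (the enumerate index is a nonnegative Int, so .toNat is exact)
def dsMasks (s : List Int) : PySem.Dict Int Nat :=
  (PySem.List.enumerate s 0).foldl
    (fun d p => d.insert p.2 (d.getD p.2 0 ||| (1 <<< p.1.toNat))) PySem.Dict.empty

-- Source B's loop body: state' = ((state << 1) | 1) & masks.get(c, 0); update last on accept bit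
-- (bitmasks are nonnegative Python ints, so Nat is exact; accept = 1 << (m-1))
def dsStep (s : List Int) (p : Nat × Int) (ic : Int × Int) : Nat × Int :=
  let st := ((p.1 <<< 1) ||| 1) &&& (dsMasks s).getD ic.2 0
  (st, if st &&& (1 <<< (s.length - 1)) ≠ 0 then ic.1 - (s.length : Int) + 1 else p.2)

def delete_subtuple_alt (sub_tuple : List Int) (the_tuple : List Int) : List Int :=
  if sub_tuple.length = 0 then the_tuple
  else
    let r := (PySem.List.enumerate the_tuple 0).foldl (dsStep sub_tuple) (0, -1)
    if r.2 = -1 then the_tuple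
    else PySem.List.slice the_tuple none (some r.2) ++
         PySem.List.slice the_tuple (some (r.2 + (sub_tuple.length : Int))) none

-- ===== PRECONDITION & SPEC =====
def Spec_delete_subtuple (sub_tuple : List Int) (the_tuple : List Int) (out : List Int) : Prop := out = delete_subtuple_alt sub_tuple the_tuple
instance (sub_tuple : List Int) (the_tuple : List Int) (out : List Int) : Decidable (Spec_delete_subtuple sub_tuple the_tuple out) := by unfold Spec_delete_subtuple; infer_instance

-- ===== CLAIM (what is proved, stated in full; the proofs are below) =====
def Claim_equal_delete_subtuple : Prop := ∀ (sub_tuple : List Int) (the_tuple : List Int), Dom_delete_subtuple sub_tuple the_tuple → Spec_delete_subtuple sub_tuple the_tuple (delete_subtuple sub_tuple the_tuple)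

-- ===== LEMMAS AND PROOFS =====

-- the index both programs compute: the last p < |u|+1-|s| whose length-|s| window of u equals s, else -1
def dsLast (s u : List Int) : Int :=
  (List.range (u.length + 1 - s.length)).foldl
    (fun acc p => if (u.drop p).take s.length = s then (p : Int) else acc) (-1)

-- bit j of x & 2^k style accept test
theorem ds_and_pow_ne_zero (x k : Nat) : (x &&& (1 <<< k) ≠ 0) ↔ x.testBit k = true := by
  rw [Nat.one_shiftLeft, Nat.and_two_pow]
  rcases h : x.testBit k <;> simp

-- bit j of the mask dictionary entry for c: set exactly when s[j] = c
theorem dsMasks_aux (s : List Int) : ∀ (k : Nat) (d : PySem.Dict Int Nat) (c : Int) (j : Nat),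
    (((PySem.List.enumerate s (k : Int)).foldl
        (fun d p => d.insert p.2 (d.getD p.2 0 ||| (1 <<< p.1.toNat))) d).getD c 0).testBit j
    = ((d.getD c 0).testBit j ||
       (decide (k ≤ j) && decide (j - k < s.length) && decide (s[j - k]? = some c))) := by
  induction s with
  | nil =>
    intro k d c j
    simp [PySem.List.enumerate_nil]
  | cons x xs ih =>
    intro k d c j
    rw [PySem.List.enumerate_cons, List.foldl_cons,
        show ((k : Int) + 1) = ((k + 1 : Nat) : Int) by push_cast; ring, ih]
    rw [PySem.Dict.getD_insert]
    by_cases hc : c = x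
    · subst hc
      rw [if_pos rfl]
      simp only [Int.toNat_natCast, Nat.testBit_or, Nat.one_shiftLeft, Nat.testBit_two_pow]
      by_cases hkj : k = j
      · subst hkj
        simp
      · by_cases hle : k + 1 ≤ j
        · have h1 : j - k = (j - (k+1)) + 1 := by omega
          simp [hkj, hle, show k ≤ j by omega, h1]
        · simp [hkj, hle, show ¬ (k ≤ j) by omega]
    · rw [if_neg hc]
      by_cases hle : k + 1 ≤ j
      · have h1 : j - k = (j - (k+1)) + 1 := by omega
        simp [hle, show k ≤ j by omega, h1]
      · by_cases hkj : j = k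
        · subst hkj
          simp [hle, Ne.symm hc]
        · simp [hle, show ¬ (k ≤ j) by omega]

theorem dsMasks_bit (s : List Int) (c : Int) (j : Nat) :
    ((dsMasks s).getD c 0).testBit j = true ↔ (j < s.length ∧ s[j]? = some c) := by
  unfold dsMasks
  rw [show (0 : Int) = ((0 : Nat) : Int) by simp, dsMasks_aux s 0 PySem.Dict.empty c j]
  simp [PySem.Dict.getD_empty]

-- the Shift-And state invariant: bit j live ↔ the last j+1 elements of pre equal s[0..j]
def dsBitInv (s pre : List Int) (st : Nat) : Prop :=
  ∀ j : Nat, (st.testBit j = true ↔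
    (j < s.length ∧ j + 1 ≤ pre.length ∧ pre.drop (pre.length - (j + 1)) = s.take (j + 1)))

theorem dsBitInv_step (s pre : List Int) (c : Int) (st : Nat) (h : dsBitInv s pre st) :
    dsBitInv s (pre ++ [c]) (((st <<< 1) ||| 1) &&& (dsMasks s).getD c 0) := by
  intro j
  simp only [List.length_append, List.length_singleton]
  cases j with
  | zero =>
    have hb0 : ((((st <<< 1) ||| 1) &&& (dsMasks s).getD c 0).testBit 0)
        = ((dsMasks s).getD c 0).testBit 0 := by
      simp
    rw [hb0]
    constructor
    · intro hb
      rcases (dsMasks_bit s c 0).mp hb with ⟨h1, h2⟩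
      refine ⟨h1, by omega, ?_⟩
      rw [show pre.length + 1 - (0 + 1) = pre.length by omega, List.drop_left,
          List.take_add_one, List.take_zero, List.nil_append, h2]
      rfl
    · rintro ⟨h1, _, h3⟩
      apply (dsMasks_bit s c 0).mpr
      refine ⟨h1, ?_⟩
      rw [show pre.length + 1 - (0 + 1) = pre.length by omega, List.drop_left,
          List.take_add_one, List.take_zero, List.nil_append] at h3
      cases hs : s[0]? with
      | none => rw [hs] at h3; simp at h3
      | some y => rw [hs] at h3; simp at h3; simp [h3]
  | succ j =>
    have hbs : ((((st <<< 1) ||| 1) &&& (dsMasks s).getD c 0).testBit (j + 1))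
        = (st.testBit j && ((dsMasks s).getD c 0).testBit (j + 1)) := by
      have h1 : (1 : Nat).testBit (j + 1) = false := by simp [Nat.testBit_succ]
      rw [Nat.testBit_and, Nat.testBit_or, Nat.testBit_shiftLeft, h1,
          show decide (j + 1 ≥ 1) = true by simp, show j + 1 - 1 = j from rfl,
          Bool.or_false, Bool.true_and]
    rw [hbs]
    constructor
    · intro hb
      have hst := (Bool.and_eq_true _ _).mp hb
      rcases (h j).mp hst.1 with ⟨hjm, hjp, hseg⟩
      rcases (dsMasks_bit s c (j+1)).mp hst.2 with ⟨hj1m, hj1c⟩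
      refine ⟨hj1m, by omega, ?_⟩
      rw [show pre.length + 1 - (j + 1 + 1) = pre.length - (j + 1) by omega,
          List.drop_append_of_le_length (by omega),
          List.take_add_one, List.getElem?_eq_getElem hj1m]
      have hc : s[j+1] = c := by
        have := List.getElem?_eq_getElem hj1m
        rw [hj1c] at this; exact (Option.some_inj.mp this.symm)
      rw [hc, hseg]
      rfl
    · rintro ⟨hj1m, hjp1, hseg⟩
      have hjp : j + 1 ≤ pre.length := by omega
      rw [show pre.length + 1 - (j + 1 + 1) = pre.length - (j + 1) by omega,
          List.drop_append_of_le_length (by omega),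
          List.take_add_one, List.getElem?_eq_getElem hj1m,
          show (some s[j+1]).toList = [s[j+1]] from rfl] at hseg
      have hinj := List.append_singleton_inj.mp hseg
      refine (Bool.and_eq_true _ _).mpr ⟨(h j).mpr ⟨by omega, hjp, hinj.1⟩, ?_⟩
      exact (dsMasks_bit s c (j+1)).mpr
        ⟨hj1m, by rw [List.getElem?_eq_getElem hj1m, hinj.2]⟩

-- updating the last-match accumulator agrees with extending dsLast by one element
theorem dsLast_step (s pre : List Int) (c : Int) (st' : Nat) (hm : 0 < s.length)
    (h' : dsBitInv s (pre ++ [c]) st') :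
    (if st' &&& (1 <<< (s.length - 1)) ≠ 0 then (pre.length : Int) - (s.length : Int) + 1
     else dsLast s pre) = dsLast s (pre ++ [c]) := by
  have hbit := h' (s.length - 1)
  rw [show s.length - 1 + 1 = s.length by omega] at hbit
  simp only [List.length_append, List.length_singleton] at hbit
  by_cases hcase : s.length ≤ pre.length + 1
  · -- the new window position p* = |pre|+1-|s| exists
    unfold dsLast
    simp only [List.length_append, List.length_singleton]
    rw [show pre.length + 1 + 1 - s.length = (pre.length + 1 - s.length) + 1 by omega,
        List.range_succ, List.foldl_append, List.foldl_cons, List.foldl_nil]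
    have hpref : (List.range (pre.length + 1 - s.length)).foldl
          (fun acc p => if ((pre ++ [c]).drop p).take s.length = s then (p : Int) else acc) (-1)
        = (List.range (pre.length + 1 - s.length)).foldl
          (fun acc p => if (pre.drop p).take s.length = s then (p : Int) else acc) (-1) := by
      apply PySem.List.foldl_congr_mem
      intro acc p hp
      rw [List.mem_range] at hp
      rw [List.drop_append_of_le_length (by omega),
          List.take_append_of_le_length (by simp only [List.length_drop]; omega)]
    rw [hpref]
    have hwin : ((pre ++ [c]).drop (pre.length + 1 - s.length)).take s.length
        = (pre ++ [c]).drop (pre.length + 1 - s.length) := by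
      apply List.take_of_length_le
      simp only [List.length_drop, List.length_append, List.length_singleton]
      omega
    have hcond : (((pre ++ [c]).drop (pre.length + 1 - s.length)).take s.length = s)
        ↔ st'.testBit (s.length - 1) = true := by
      rw [hwin]
      constructor
      · intro hEq
        exact hbit.mpr ⟨by omega, hcase, by rw [hEq, List.take_length]⟩
      · intro hb
        rcases hbit.mp hb with ⟨_, _, hseg⟩
        rw [hseg, List.take_length]
    by_cases hb : st'.testBit (s.length - 1) = true
    · rw [if_pos ((ds_and_pow_ne_zero st' (s.length - 1)).mpr hb), if_pos (hcond.mpr hb)]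
      omega
    · rw [if_neg (fun hnz => hb ((ds_and_pow_ne_zero st' (s.length - 1)).mp hnz)),
          if_neg (fun hc2 => hb (hcond.mp hc2))]
  · -- the pattern is still longer than the processed prefix: no window on either side
    have hb : st'.testBit (s.length - 1) = false := by
      rcases h : st'.testBit (s.length - 1) with _ | _
      · rfl
      · exact absurd (hbit.mp h).2.1 (by omega)
    rw [if_neg (by rw [ds_and_pow_ne_zero]; simp [hb])]
    unfold dsLast
    simp only [List.length_append, List.length_singleton]
    rw [show pre.length + 1 - s.length = 0 by omega,
        show pre.length + 1 + 1 - s.length = 0 by omega]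
    simp

-- main loop invariant for B's single pass
theorem dsLoop (s : List Int) (hm : 0 < s.length) :
    ∀ (rest pre : List Int) (st : Nat),
      dsBitInv s pre st →
      ((PySem.List.enumerate rest (pre.length : Int)).foldl (dsStep s) (st, dsLast s pre)).2
        = dsLast s (pre ++ rest) := by
  intro rest
  induction rest with
  | nil => intro pre st _; simp [PySem.List.enumerate_nil]
  | cons c rest' ih =>
    intro pre st hst
    rw [PySem.List.enumerate_cons, List.foldl_cons]
    have hstep : dsStep s (st, dsLast s pre) ((pre.length : Int), c)
        = (((st <<< 1) ||| 1) &&& (dsMasks s).getD c 0, dsLast s (pre ++ [c])) := by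
      unfold dsStep
      simp only []
      rw [dsLast_step s pre c _ hm (dsBitInv_step s pre c st hst)]
    rw [hstep,
        show ((pre.length : Int) + 1) = (((pre ++ [c]).length : Nat) : Int) by simp,
        ih (pre ++ [c]) _ (dsBitInv_step s pre c st hst),
        List.append_assoc, List.singleton_append]

-- A's range fold with a natural bound equals the List.range fold defining dsLast
theorem ds_fold_range (s t : List Int) (K : Nat) :
    (PySem.List.pyRange 0 (K : Int) 1).foldl
      (fun idx i =>
        if s = PySem.List.slice t (some i) (some (i + (s.length : Int))) then i else idx) (-1)
    = (List.range K).foldl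
        (fun acc p => if (t.drop p).take s.length = s then (p : Int) else acc) (-1) := by
  induction K with
  | zero => simp [PySem.List.pyRange_one_eq_nil, List.range_zero]
  | succ k ih =>
    rw [show ((k + 1 : Nat) : Int) = (k : Int) + 1 by push_cast; ring,
        PySem.List.pyRange_one_succ_right (Int.natCast_nonneg k),
        List.range_succ, List.foldl_append, List.foldl_append,
        List.foldl_cons, List.foldl_nil, List.foldl_cons, List.foldl_nil, ih,
        PySem.List.slice_natCast_add]
    by_cases h : (t.drop k).take s.length = s
    · rw [if_pos h, if_pos h.symm]
    · rw [if_neg h, if_neg (fun hh => h hh.symm)]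

-- … and with A's Int bound (negative bound ⇒ empty range on both sides)
theorem ds_fold_eq (s t : List Int) :
    (PySem.List.pyRange 0 ((t.length : Int) - (s.length : Int) + 1) 1).foldl
      (fun idx i =>
        if s = PySem.List.slice t (some i) (some (i + (s.length : Int))) then i else idx) (-1)
    = dsLast s t := by
  unfold dsLast
  by_cases hb : 0 ≤ (t.length : Int) - (s.length : Int) + 1
  · rw [show (t.length : Int) - (s.length : Int) + 1
        = ((t.length + 1 - s.length : Nat) : Int) by omega]
    rw [ds_fold_range]
  · rw [PySem.List.pyRange_one_eq_nil (by omega),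
        show t.length + 1 - s.length = 0 by omega]
    simp

-- ===== VERDICT (by name: the statement is the Claim_ definition above) =====
theorem delete_subtuple_spec : Claim_equal_delete_subtuple := by
  intro s t _
  unfold Spec_delete_subtuple delete_subtuple delete_subtuple_alt
  simp only [ds_fold_eq]
  by_cases hm : s.length = 0
  · -- empty pattern: A's last match is position |t|, so A splices nothing; B returns t
    rw [if_pos hm]
    have hs : s = [] := List.eq_nil_iff_length_eq_zero.mpr hm
    subst hs
    have hL : dsLast [] t = (t.length : Int) := by
      unfold dsLast
      simp only [List.length_nil, Nat.sub_zero, List.take_zero]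
      rw [List.range_succ, List.foldl_append, List.foldl_cons, List.foldl_nil]
      simp
    rw [hL, if_neg (by omega)]
    rw [PySem.List.slice_to_natCast,
        show (t.length : Int) + (([] : List Int).length : Int) = ((t.length : Nat) : Int) by simp,
        PySem.List.slice_from_natCast, List.take_length, List.drop_length, List.append_nil]
  · rw [if_neg hm]
    have h0 : dsBitInv s [] 0 := by
      intro j
      simp [Nat.zero_testBit]
    have hinit : dsLast s [] = -1 := by
      unfold dsLast
      simp only [List.length_nil]
      rw [show 0 + 1 - s.length = 0 by omega]
      simp
    have := dsLoop s (by omega) t [] 0 h0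
    rw [hinit] at this
    simp only [List.length_nil, Int.natCast_zero, List.nil_append] at this
    rw [this]
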